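-- pv_equiv track=rewrite | github.com/shubhampatil496/LP2 | 2nd.py | distance_to_win
-- ===== SOURCE A (Python) =====
-- def distance_to_win(board, player):
--     # Lower is better
--     dist = 0
--     for i in range(3):
--         row = [board[i][j] for j in range(3)]
--         col = [board[j][i] for j in range(3)]
--         dist += (3 - row.count(player) - row.count('X' if player == 'O' else 'O'))
--         dist += (3 - col.count(player) - col.count('X' if player == 'O' else 'O'))
--     return dist
-- ===== SOURCE B (Python) =====
-- def distance_to_win(board, player):
--     # Lower is better
--     opponent = 'X' if player == 'O' else 'O'
--     miss = 0
--     for i in range(3):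
--         for j in range(3):
--             cell = board[i][j]
--             if cell != player and cell != opponent:
--                 miss += 1
--     return 2 * miss
-- ===== Notes on version B (the rewrite author's own statement) =====
-- stated objective: simpler
-- what changed: Replaces the six per-line .count scans over rows and columns by a single cell-by-cell pass counting 3x3 cells that are neither player nor opponent, returning twice that count (row-sums and column-sums of such cells are both the total).
import Mathlib
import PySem

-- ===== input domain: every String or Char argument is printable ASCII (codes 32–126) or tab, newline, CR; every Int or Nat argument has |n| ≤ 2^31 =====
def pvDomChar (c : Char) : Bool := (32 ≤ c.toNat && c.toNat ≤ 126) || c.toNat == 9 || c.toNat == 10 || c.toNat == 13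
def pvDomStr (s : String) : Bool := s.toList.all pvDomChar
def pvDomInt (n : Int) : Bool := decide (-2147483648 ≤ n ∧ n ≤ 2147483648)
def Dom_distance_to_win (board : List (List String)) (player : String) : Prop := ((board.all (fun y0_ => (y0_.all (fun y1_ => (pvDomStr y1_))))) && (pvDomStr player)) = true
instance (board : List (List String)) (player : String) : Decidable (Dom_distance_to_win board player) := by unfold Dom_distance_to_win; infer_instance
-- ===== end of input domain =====

-- B replaces the six per-line count scans by one cell-by-cell pass counting 'neither-player-nor-opponent'
-- cells, returning twice that count (objective: simpler).

-- ===== PORT A =====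
-- board[i][j] with in-range-by-Pre_ indices; the .getD defaults are never reached inside Pre_
def pvCellA (board : List (List String)) (i j : Int) : String :=
  (PySem.List.pyGet? ((PySem.List.pyGet? board i).getD []) j).getD ""

def distance_to_win (board : List (List String)) (player : String) : Int :=
  (PySem.List.pyRange 0 3 1).foldl (fun dist i =>
    let row := (PySem.List.pyRange 0 3 1).map (fun j => pvCellA board i j)
    let col := (PySem.List.pyRange 0 3 1).map (fun j => pvCellA board j i)
    let dist := dist + (3 - (PySem.List.count row player : Int)
                          - (PySem.List.count row (if player == "O" then "X" else "O") : Int))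
    dist + (3 - (PySem.List.count col player : Int)
              - (PySem.List.count col (if player == "O" then "X" else "O") : Int))) 0

-- ===== PORT B =====
def distance_to_win_alt (board : List (List String)) (player : String) : Int :=
  let opponent := if player == "O" then "X" else "O"
  let miss := (PySem.List.pyRange 0 3 1).foldl (fun miss i =>
    (PySem.List.pyRange 0 3 1).foldl (fun miss j =>
      let cell := (PySem.List.pyGet? ((PySem.List.pyGet? board i).getD []) j).getD ""
      if cell ≠ player ∧ cell ≠ opponent then miss + 1 else miss) miss) 0
  2 * miss

-- ===== PRECONDITION & SPEC =====
-- Pre_ excludes exactly the boards where A raises IndexError: fewer than 3 rows, or one of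
-- the first 3 rows shorter than 3 cells (B raises there too).
def Pre_distance_to_win (board : List (List String)) (player : String) : Prop :=
  3 ≤ board.length ∧ ∀ r ∈ board.take 3, 3 ≤ r.length

instance (board : List (List String)) (player : String) : Decidable (Pre_distance_to_win board player) := by
  unfold Pre_distance_to_win; infer_instance

def pvWitness_distance_to_win : List (List String) × String :=
  ([["X", "O", " "], [" ", "X", "O"], ["O", " ", "X"]], "X")

def Spec_distance_to_win (board : List (List String)) (player : String) (out : Int) : Prop := out = distance_to_win_alt board player
instance (board : List (List String)) (player : String) (out : Int) : Decidable (Spec_distance_to_win board player out) := by unfold Spec_distance_to_win; infer_instance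

-- ===== CLAIM (what is proved, stated in full; the proofs are below) =====
def Claim_equal_distance_to_win : Prop := ∀ (board : List (List String)) (player : String), Dom_distance_to_win board player → Pre_distance_to_win board player → Spec_distance_to_win board player (distance_to_win board player)

-- ===== LEMMAS AND PROOFS =====

-- pull the accumulator out of a counting 'if', linearising the unfolded loops into sums of indicators
theorem pv_if_push (P : Prop) [Decidable P] (a : Int) :
    (if P then a + 1 else a) = a + (if P then (1 : Int) else 0) := by
  split <;> simp

-- per-cell accounting: player and opponent differ, so a cell is counted once on each side
theorem pv_cell_lemma (p o : String) (h : p ≠ o) (c : String) :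
    (if ¬c = p ∧ ¬c = o then (1 : Int) else 0)
      = 1 - (if c = p then (1 : Int) else 0) - (if c = o then (1 : Int) else 0) := by
  by_cases h1 : c = p <;> by_cases h2 : c = o <;> simp_all

theorem pv_get1 {α : Type} (x y : α) (l : List α) : PySem.List.pyGet? (x::y::l) 1 = some y := by
  simp [PySem.List.pyGet?, PySem.List.pyIdx?]

theorem pv_get2 {α : Type} (x y z : α) (l : List α) : PySem.List.pyGet? (x::y::z::l) 2 = some z := by
  have h : (2:Int) ≤ (l.length:Int) + 1 + 1 := by omega
  simp [PySem.List.pyGet?, PySem.List.pyIdx?, h]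

-- ===== VERDICT (by name: the statement is the Claim_ definition above) =====
theorem distance_to_win_spec : Claim_equal_distance_to_win := by
  intro board player _ hpre
  obtain ⟨hlen, hrows⟩ := hpre
  match board, hlen with
  | r0 :: r1 :: r2 :: rest, _ =>
    have h0 : 3 ≤ r0.length := hrows r0 (by simp)
    have h1 : 3 ≤ r1.length := hrows r1 (by simp)
    have h2 : 3 ≤ r2.length := hrows r2 (by simp)
    match r0, h0 with
    | a0 :: a1 :: a2 :: _, _ =>
      match r1, h1 with
      | b0 :: b1 :: b2 :: _, _ =>
        match r2, h2 with
        | c0 :: c1 :: c2 :: _, _ =>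
          have hne : player ≠ (if player = "O" then "X" else "O") := by
            split <;> simp_all
          unfold Spec_distance_to_win distance_to_win distance_to_win_alt pvCellA
          simp [show PySem.List.pyRange 0 3 1 = [0, 1, 2] from by decide,
            PySem.List.pyGet?_zero_cons, pv_get1, pv_get2, PySem.List.count_eq,
            List.count_cons, pv_if_push]
          simp only [pv_cell_lemma player _ hne]
          ring
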